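-- pv_equiv track=rewrite | github.com/samsks/python_learningV1 | exercises/exer02.py | remove_more_than_two_repetitions
-- ===== SOURCE A (Python) =====
-- def remove_more_than_two_repetitions(text: str):
--     response = []
--     response.append(text[0])
--     response.append(text[1])
--
--     for index, char in enumerate(text[2:], 2):
--         if text[index - 1] != char or text[index - 2] != char:
--             response.append(char)
--
--     return "".join(response)
-- ===== SOURCE B (Python) =====
-- def remove_more_than_two_repetitions(text: str):
--     pieces = []
--     i = 0
--     n = len(text)
--     while i < n:
--         j = i
--         while j < n and text[j] == text[i]:
--             j += 1
--         pieces.append(text[i] * min(j - i, 2))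
--         i = j
--     return "".join(pieces)
-- ===== Notes on version B (the rewrite author's own statement) =====
-- stated objective: alternative
-- what changed: B scans maximal runs of identical characters with an inner run-length loop and emits min(run,2) copies per run, instead of A's per-character loop with text[index-1]/text[index-2] lookbacks; B also returns naturally on inputs of length < 2 where A raises IndexError.
-- crash fix: On strings of length < 2 A raises IndexError (text[1] access) while B returns the string unchanged. — e.g. on remove_more_than_two_repetitions("a"): A raises IndexError, B returns "a"
import Mathlib
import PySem

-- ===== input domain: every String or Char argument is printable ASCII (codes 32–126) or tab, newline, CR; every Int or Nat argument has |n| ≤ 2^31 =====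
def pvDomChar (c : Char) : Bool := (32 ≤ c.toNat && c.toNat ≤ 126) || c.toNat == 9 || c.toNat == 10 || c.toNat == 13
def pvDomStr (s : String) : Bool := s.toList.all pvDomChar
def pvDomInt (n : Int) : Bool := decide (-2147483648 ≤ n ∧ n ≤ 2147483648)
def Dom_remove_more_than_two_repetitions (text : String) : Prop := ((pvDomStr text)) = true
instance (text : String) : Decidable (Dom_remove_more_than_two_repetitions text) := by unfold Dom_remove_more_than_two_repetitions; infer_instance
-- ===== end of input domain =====

-- B emits each maximal run of identical characters as min(run, 2) copies, instead of A's per-character loop with text[index-1]/text[index-2] lookbacks; equal return values on all strings of length ≥ 2.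

-- ===== PORT A =====
-- pyGetD with default ' ' stands for text[k]: under Pre_ every index A reads is in range, so the default is never used.
def remove_more_than_two_repetitions (text : String) : String :=
  let l := text.toList
  let response : List Char := [] ++ [PySem.List.pyGetD l 0 ' '] ++ [PySem.List.pyGetD l 1 ' ']
  let response :=
    (PySem.List.enumerate (PySem.List.slice l (some 2) none) 2).foldl
      (fun resp p =>
        if PySem.List.pyGetD l (p.1 - 1) ' ' ≠ p.2 ∨ PySem.List.pyGetD l (p.1 - 2) ' ' ≠ p.2 then
          resp ++ [p.2]
        else resp)
      response
  String.ofList response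

-- ===== PORT B =====
-- Source B's outer while loop = structural recursion over the remaining suffix;
-- its inner counting while loop (j) = takeWhile/dropWhile of the current run.
def pvRuns : List Char → List Char
  | [] => []
  | c :: rest =>
      List.replicate (min ((rest.takeWhile (fun d => d == c)).length + 1) 2) c
        ++ pvRuns (rest.dropWhile (fun d => d == c))
  termination_by l => l.length
  decreasing_by
    simp only [List.length_cons]
    exact Nat.lt_succ_of_le (List.length_dropWhile_le _ _)

def remove_more_than_two_repetitions_alt (text : String) : String :=
  String.ofList (pvRuns text.toList)

-- ===== PRECONDITION & SPEC =====
-- A reads text[0] and text[1] unconditionally, raising IndexError on strings of length < 2; Pre_ excludes exactly those.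
def Pre_remove_more_than_two_repetitions (text : String) : Prop := 2 ≤ text.toList.length
instance (text : String) : Decidable (Pre_remove_more_than_two_repetitions text) := by unfold Pre_remove_more_than_two_repetitions; infer_instance
def pvWitness_remove_more_than_two_repetitions : String := "aaab"

-- On strings of length < 2 A raises IndexError (the text[1] access) while B returns the string unchanged
-- (made checkable by remove_more_than_two_repetitions_raises at the bottom).
def Raises_remove_more_than_two_repetitions (text : String) : Prop := text.toList.length < 2
instance (text : String) : Decidable (Raises_remove_more_than_two_repetitions text) := by unfold Raises_remove_more_than_two_repetitions; infer_instance
def pvRaiseWitness_remove_more_than_two_repetitions : String := "a"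
def pvRaiseWitnessOut_remove_more_than_two_repetitions : String := "a"

def Spec_remove_more_than_two_repetitions (text : String) (out : String) : Prop := out = remove_more_than_two_repetitions_alt text
instance (text : String) (out : String) : Decidable (Spec_remove_more_than_two_repetitions text out) := by unfold Spec_remove_more_than_two_repetitions; infer_instance

-- ===== CLAIM (what is proved, stated in full; the proofs are below) =====
def Claim_equal_remove_more_than_two_repetitions : Prop := ∀ (text : String), Dom_remove_more_than_two_repetitions text → Pre_remove_more_than_two_repetitions text → Spec_remove_more_than_two_repetitions text (remove_more_than_two_repetitions text)

def Claim_raises_remove_more_than_two_repetitions : Prop := (∀ (text : String), Dom_remove_more_than_two_repetitions text → Raises_remove_more_than_two_repetitions text → ¬ Pre_remove_more_than_two_repetitions text) ∧ (Dom_remove_more_than_two_repetitions (pvRaiseWitness_remove_more_than_two_repetitions) ∧ Raises_remove_more_than_two_repetitions (pvRaiseWitness_remove_more_than_two_repetitions) ∧ remove_more_than_two_repetitions_alt (pvRaiseWitness_remove_more_than_two_repetitions) = pvRaiseWitnessOut_remove_more_than_two_repetitions)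

-- ===== LEMMAS AND PROOFS =====

-- Proof-side middle spec: one pass carrying the previous two characters (p2 = two back, p1 = one back).
def pvGo2 (p2 p1 : Option Char) : List Char → List Char
  | [] => []
  | c :: rest => (if p1 = some c ∧ p2 = some c then [] else [c]) ++ pvGo2 p1 (some c) rest

-- Inside a run the state (some c, some c) drops every further copy of c.
theorem pvGo2_run (c : Char) (d : List Char) : ∀ (k : Nat),
    pvGo2 (some c) (some c) (List.replicate k c ++ d) = pvGo2 (some c) (some c) d := by
  intro k
  induction k with
  | zero => simp
  | succ n ih => simpa [List.replicate_succ, pvGo2] using ih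

-- B's run-based pass equals the lookback pass whenever the previous character differs from the head.
theorem pvGo2_eq_pvRuns (l : List Char) : ∀ (p2 p1 : Option Char),
    (∀ c, l.head? = some c → p1 ≠ some c) → pvGo2 p2 p1 l = pvRuns l := by
  induction l using pvRuns.induct with
  | case1 => intro _ _ _; rw [pvRuns]; rfl
  | case2 c rest ih =>
    intro p2 p1 h
    have hp1 : p1 ≠ some c := h c rfl
    have hsplit : rest = rest.takeWhile (fun d => d == c) ++ rest.dropWhile (fun d => d == c) :=
      (List.takeWhile_append_dropWhile).symm
    have htw : rest.takeWhile (fun d => d == c) = List.replicate (rest.takeWhile (fun d => d == c)).length c := by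
      apply List.eq_replicate_of_mem
      intro b hb
      have := List.mem_takeWhile_imp hb
      simpa [beq_iff_eq] using this
    have hdw : ∀ e, (rest.dropWhile (fun d => d == c)).head? = some e → (some c : Option Char) ≠ some e := by
      intro e he hce
      have := List.head?_dropWhile_not rest (p := fun d => d == c)
      rw [he] at this
      simp at this
      cases hce
      exact this rfl
    rw [pvRuns]
    cases h0 : (rest.takeWhile (fun d => d == c)).length with
    | zero =>
      have hrest : rest = rest.dropWhile (fun d => d == c) := by
        conv_lhs => rw [hsplit, htw, h0]
        simp
      rw [pvGo2, if_neg (by simp [hp1])]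
      conv_lhs => rw [hrest]
      rw [ih p1 (some c) hdw]
      simp
    | succ k' =>
      have hrest : rest = c :: (List.replicate k' c ++ rest.dropWhile (fun d => d == c)) := by
        conv_lhs => rw [hsplit, htw, h0]
        simp [List.replicate_succ]
      rw [pvGo2, if_neg (by simp [hp1])]
      conv_lhs => rw [hrest, pvGo2]
      rw [if_neg (by simp [hp1]), pvGo2_run, ih (some c) (some c) hdw]
      simp [List.replicate_succ]

-- A's indexed fold over the tail equals the two-lookback pass: the invariant is that the
-- list is pre0 ++ [x, y] ++ s and the enumeration starts at pre0.length + 2.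
theorem pvFoldA (s : List Char) : ∀ (pre0 : List Char) (x y : Char) (acc : List Char),
    (PySem.List.enumerate s ((pre0.length + 2 : Nat) : Int)).foldl
      (fun resp p =>
        if PySem.List.pyGetD (pre0 ++ [x, y] ++ s) (p.1 - 1) ' ' ≠ p.2 ∨
           PySem.List.pyGetD (pre0 ++ [x, y] ++ s) (p.1 - 2) ' ' ≠ p.2 then
          resp ++ [p.2]
        else resp)
      acc
    = acc ++ pvGo2 (some x) (some y) s := by
  induction s with
  | nil => intro pre0 x y acc; simp [PySem.List.enumerate_nil, pvGo2]
  | cons c rest ih =>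
    intro pre0 x y acc
    rw [PySem.List.enumerate_cons, List.foldl_cons]
    have hy : PySem.List.pyGetD (pre0 ++ [x, y] ++ (c :: rest)) (((pre0.length + 2 : Nat) : Int) - 1) ' ' = y := by
      rw [show ((pre0.length + 2 : Nat) : Int) - 1 = ((pre0.length + 1 : Nat) : Int) by push_cast; ring,
          PySem.List.pyGetD_natCast,
          show pre0 ++ [x, y] ++ (c :: rest) = (pre0 ++ [x]) ++ (y :: (c :: rest)) by simp]
      rw [List.getD_eq_getElem?_getD, List.getElem?_append_right (by simp)]
      simp
    have hx : PySem.List.pyGetD (pre0 ++ [x, y] ++ (c :: rest)) (((pre0.length + 2 : Nat) : Int) - 2) ' ' = x := by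
      rw [show ((pre0.length + 2 : Nat) : Int) - 2 = ((pre0.length : Nat) : Int) by push_cast; ring,
          PySem.List.pyGetD_natCast,
          show pre0 ++ [x, y] ++ (c :: rest) = pre0 ++ (x :: (y :: c :: rest)) by simp]
      rw [List.getD_eq_getElem?_getD, List.getElem?_append_right (by simp)]
      simp
    simp only [hy, hx]
    have hl : pre0 ++ [x, y] ++ (c :: rest) = (pre0 ++ [x]) ++ [y, c] ++ rest := by simp
    have hn : ((pre0.length + 2 : Nat) : Int) + 1 = (((pre0 ++ [x]).length + 2 : Nat) : Int) := by
      simp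
      ring
    rw [hl, hn, ih (pre0 ++ [x]) y c]
    rw [pvGo2]
    by_cases hc : y = c ∧ x = c
    · rw [if_neg (by simp [hc.1, hc.2]), if_pos (by simp [hc.1, hc.2])]
      simp
    · have hc' : y ≠ c ∨ x ≠ c := by tauto
      rw [if_pos hc', if_neg (by rcases hc' with h | h <;> simp [h])]
      simp

theorem pvTop (text : String) (hpre : 2 ≤ text.toList.length) :
    remove_more_than_two_repetitions text = remove_more_than_two_repetitions_alt text := by
  unfold remove_more_than_two_repetitions_alt
  rcases hl : text.toList with _ | ⟨a, _ | ⟨b, rest⟩⟩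
  · rw [hl] at hpre; simp at hpre
  · rw [hl] at hpre; simp at hpre
  · unfold remove_more_than_two_repetitions
    rw [hl]
    have h0 : PySem.List.pyGetD (a :: b :: rest) 0 ' ' = a := PySem.List.pyGetD_zero_cons a _ ' '
    have h1 : PySem.List.pyGetD (a :: b :: rest) 1 ' ' = b := by
      simp [PySem.List.pyGetD, PySem.List.pyGet?, PySem.List.pyIdx?]
    have hsl : PySem.List.slice (a :: b :: rest) (some 2) (none : Option Int) = rest := by
      simp [pysem]
    have hF := pvFoldA rest [] a b [a, b]
    norm_num at hF
    simp only [h0, h1, hsl, List.nil_append, List.singleton_append, ne_eq]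
    have hg : pvRuns (a :: b :: rest) = pvGo2 none none (a :: b :: rest) :=
      (pvGo2_eq_pvRuns _ none none (by simp)).symm
    rw [hg, show pvGo2 none none (a :: b :: rest) = a :: b :: pvGo2 (some a) (some b) rest by
      simp [pvGo2]]
    exact congrArg String.ofList hF

-- ===== VERDICT (by name: the statement is the Claim_ definition above) =====
theorem remove_more_than_two_repetitions_spec : Claim_equal_remove_more_than_two_repetitions := by
  intro text _ hpre
  unfold Spec_remove_more_than_two_repetitions
  exact pvTop text hpre

theorem remove_more_than_two_repetitions_raises : Claim_raises_remove_more_than_two_repetitions := by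
  unfold Claim_raises_remove_more_than_two_repetitions
  refine ⟨fun t _ h hp => ?_, by decide, by decide, ?_⟩
  · unfold Raises_remove_more_than_two_repetitions at h
    unfold Pre_remove_more_than_two_repetitions at hp
    omega
  · show String.ofList (pvRuns "a".toList) = "a"
    rw [show "a".toList = ['a'] from rfl]
    rw [show pvRuns ['a'] = ['a'] by rw [pvRuns.eq_def]; simp [pvRuns]]

-- self-check: the raise-witness facts, projected from the raises theorem
theorem remove_more_than_two_repetitions_raises_witness :
    Raises_remove_more_than_two_repetitions pvRaiseWitness_remove_more_than_two_repetitions ∧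
      remove_more_than_two_repetitions_alt pvRaiseWitness_remove_more_than_two_repetitions
        = pvRaiseWitnessOut_remove_more_than_two_repetitions :=
  remove_more_than_two_repetitions_raises.2.2
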